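-- pv_equiv track=rewrite | github.com/Skandberg/DoubleDelimeterSubstr | DoubleDelimeterSubstr.py | doubleCharDelimeter
-- ===== SOURCE A (Python) =====
-- def doubleCharDelimeter(word):
--     word_list=[char for char in word]
--     substr_list=[]
--     substr=''
--     for index, value in enumerate (word_list):
--         substr=substr+value
--         if index!=len(word_list)-1:
--
--             if value==word_list[index+1]:
--                 substr_list.append(substr)
--                 substr=''
--         else:
--             substr_list.append(substr)
--     return max(substr_list,key=len)
-- ===== SOURCE B (Python) =====
-- def doubleCharDelimeter(word):
--     boundaries = [i for i in range(len(word) - 1) if word[i] == word[i + 1]]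
--     segments = []
--     start = 0
--     for b in boundaries:
--         segments.append(word[start:b + 1])
--         start = b + 1
--     if word:
--         segments.append(word[start:])
--     return max(segments, key=len)
-- ===== Notes on version B (the rewrite author's own statement) =====
-- stated objective: alternative
-- what changed: Instead of one character-by-character loop that grows a running substring and flushes it at each doubled-char boundary, B first computes the list of boundary indices (i with word[i]==word[i+1]) and then cuts the word into segments by slicing between consecutive boundaries, finally taking max by length.
import Mathlib
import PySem

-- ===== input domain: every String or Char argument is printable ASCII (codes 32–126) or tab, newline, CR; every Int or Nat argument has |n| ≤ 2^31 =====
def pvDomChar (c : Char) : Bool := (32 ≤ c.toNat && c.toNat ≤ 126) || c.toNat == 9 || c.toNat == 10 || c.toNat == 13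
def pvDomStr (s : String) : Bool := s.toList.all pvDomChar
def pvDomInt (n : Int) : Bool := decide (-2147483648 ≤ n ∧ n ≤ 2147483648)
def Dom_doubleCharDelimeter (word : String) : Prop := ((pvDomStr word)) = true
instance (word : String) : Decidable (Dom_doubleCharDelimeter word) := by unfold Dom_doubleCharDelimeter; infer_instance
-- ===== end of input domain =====

-- B replaces A's single running-substring loop by first computing the boundary index list
-- and then slicing the word between consecutive boundaries (objective: alternative decomposition).

-- ===== PORT A =====
-- A's for-loop over enumerate(word_list): structural recursion over the remaining
-- characters carrying the running index, the current substring and the segment list.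
def pvLoopA (cs : List Char) : Nat → List Char → List Char → List (List Char) → List (List Char)
  | _, [], _, segs => segs
  | i, c :: rs, substr, segs =>
    -- substr = substr + value
    if i ≠ cs.length - 1 then
      if PySem.List.pyGet? cs ((i : Int) + 1) = some c then
        pvLoopA cs (i + 1) rs [] (segs ++ [substr ++ [c]])
      else
        pvLoopA cs (i + 1) rs (substr ++ [c]) segs
    else
      pvLoopA cs (i + 1) rs (substr ++ [c]) (segs ++ [substr ++ [c]])

def doubleCharDelimeter (word : String) : String :=
  -- max(substr_list, key=len); none (= ValueError on the empty word) is excluded by Pre_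
  match PySem.List.max? (pvLoopA word.toList 0 word.toList [] []) (fun s => s.length) with
  | some s => String.ofList s
  | none => ""

-- ===== PORT B =====
-- segments: boundary list, then a fold cutting a slice at each boundary, then the tail slice
def pvSegsB (cs : List Char) : List (List Char) :=
  let boundaries := (List.range (cs.length - 1)).filter (fun i => cs[i]? = cs[i + 1]?)
  let p := boundaries.foldl
    (fun (p : List (List Char) × Nat) b =>
      (p.1 ++ [PySem.List.slice cs (some ((p.2 : Nat) : Int)) (some (((b : Nat) : Int) + 1))], b + 1))
    ([], 0)
  if cs = [] then p.1 else p.1 ++ [PySem.List.slice cs (some ((p.2 : Nat) : Int)) none]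

def doubleCharDelimeter_alt (word : String) : String :=
  match PySem.List.max? (pvSegsB word.toList) (fun s => s.length) with
  | some s => String.ofList s
  | none => ""

-- ===== PRECONDITION & SPEC =====
-- Pre_ excludes only the empty word, on which A's max([]) raises ValueError.
def Pre_doubleCharDelimeter (word : String) : Prop := word ≠ ""
instance (word : String) : Decidable (Pre_doubleCharDelimeter word) := by unfold Pre_doubleCharDelimeter; infer_instance
def pvWitness_doubleCharDelimeter : String := "abba"

def Spec_doubleCharDelimeter (word : String) (out : String) : Prop := out = doubleCharDelimeter_alt word
instance (word : String) (out : String) : Decidable (Spec_doubleCharDelimeter word out) := by unfold Spec_doubleCharDelimeter; infer_instance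

-- ===== CLAIM (what is proved, stated in full; the proofs are below) =====
def Claim_equal_doubleCharDelimeter : Prop := ∀ (word : String), Dom_doubleCharDelimeter word → Pre_doubleCharDelimeter word → Spec_doubleCharDelimeter word (doubleCharDelimeter word)

-- ===== LEMMAS AND PROOFS =====

-- the common segmentation both ports compute, as structural recursion on the characters
def pvSplit : List Char → List (List Char)
  | [] => []
  | [c] => [[c]]
  | a :: b :: t => if a = b then [a] :: pvSplit (b :: t) else
      match pvSplit (b :: t) with
      | [] => [[a]]
      | s :: ss => (a :: s) :: ss

def pvConsHead (pre : List Char) : List (List Char) → List (List Char)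
  | [] => [pre]
  | s :: ss => (pre ++ s) :: ss

lemma pvSplit_ne_nil (cs : List Char) (h : cs ≠ []) : pvSplit cs ≠ [] := by
  match cs with
  | [c] => simp [pvSplit]
  | a :: b :: t =>
    simp only [pvSplit]
    split
    · simp
    · split <;> simp

lemma pvSplit_cons_eq (a b : Char) (t : List Char) (h : a = b) :
    pvSplit (a :: b :: t) = [a] :: pvSplit (b :: t) := by
  rw [pvSplit.eq_def]
  simp [h]

lemma pvSplit_cons_ne (a b : Char) (t : List Char) (h : ¬ a = b) :
    pvSplit (a :: b :: t) = pvConsHead [a] (pvSplit (b :: t)) := by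
  obtain ⟨s, ss, hss⟩ : ∃ s ss, pvSplit (b :: t) = s :: ss := by
    cases hx : pvSplit (b :: t) with
    | nil => exact absurd hx (pvSplit_ne_nil _ (by simp))
    | cons s ss => exact ⟨s, ss, rfl⟩
  rw [pvSplit.eq_def]
  simp [h, hss, pvConsHead]

lemma pvLoopA_spec (cs : List Char) : ∀ (rest : List Char) (i : Nat) (substr : List Char)
    (segs : List (List Char)), cs.drop i = rest → rest ≠ [] →
    pvLoopA cs i rest substr segs = segs ++ pvConsHead substr (pvSplit rest) := by
  intro rest
  induction rest with
  | nil => intro _ _ _ _ hne; exact absurd rfl hne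
  | cons c rs ih =>
    intro i substr segs hdrop hrestne
    have hlen : cs.length - i = rs.length + 1 := by
      have h := congrArg List.length hdrop
      simp at h
      omega
    have hile : i < cs.length := by omega
    cases rs with
    | nil =>
      have hi : ¬ i ≠ cs.length - 1 := by simp at hlen; omega
      rw [pvLoopA, if_neg hi]
      simp [pvLoopA, pvSplit, pvConsHead]
    | cons r rs' =>
      have hne : i ≠ cs.length - 1 := by simp at hlen; omega
      have hdrop1 : cs.drop (i + 1) = r :: rs' := by
        have h := congrArg List.tail hdrop
        simpa [List.tail_drop] using h
      have hget : PySem.List.pyGet? cs ((i : Int) + 1) = some r := by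
        have h1 : cs[i + 1]? = some r := by
          have h := congrArg (fun l => l[0]?) hdrop1
          simpa using h
        rw [show ((i : Int) + 1) = (((i + 1 : Nat) : Int)) from by push_cast; ring,
          PySem.List.pyGet?_natCast]
        exact h1
      obtain ⟨s, ss, hss⟩ : ∃ s ss, pvSplit (r :: rs') = s :: ss := by
        cases h : pvSplit (r :: rs') with
        | nil => exact absurd h (pvSplit_ne_nil _ (by simp))
        | cons s ss => exact ⟨s, ss, rfl⟩
      by_cases hrc : r = c
      · subst hrc
        rw [pvLoopA, if_pos hne, if_pos hget]
        rw [ih (i + 1) [] (segs ++ [substr ++ [r]]) hdrop1 (by simp)]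
        rw [pvSplit_cons_eq r r rs' rfl, hss]
        simp [pvConsHead]
      · rw [pvLoopA, if_pos hne,
          if_neg (by rw [hget]; intro hcon; exact hrc (Option.some_inj.mp hcon))]
        rw [ih (i + 1) (substr ++ [c]) segs hdrop1 (by simp)]
        rw [pvSplit_cons_ne c r rs' (fun hx => hrc hx.symm), hss]
        simp [pvConsHead]

-- A's segment list is pvSplit
lemma segsA_eq (cs : List Char) (h : cs ≠ []) :
    pvLoopA cs 0 cs [] [] = pvSplit cs := by
  rw [pvLoopA_spec cs cs 0 [] [] (by simp) h]
  obtain ⟨s, ss, hss⟩ : ∃ s ss, pvSplit cs = s :: ss := by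
    cases hx : pvSplit cs with
    | nil => exact absurd hx (pvSplit_ne_nil _ h)
    | cons s ss => exact ⟨s, ss, rfl⟩
  simp [hss, pvConsHead]

-- B reformulated: recursive segment builder from a boundary list
def pvSegsFrom (cs : List Char) : List Nat → Nat → List (List Char)
  | [], start => [cs.drop start]
  | b :: bs, start => (cs.drop start).take (b + 1 - start) :: pvSegsFrom cs bs (b + 1)

def pvBnd (cs : List Char) : List Nat :=
  (List.range (cs.length - 1)).filter (fun i => cs[i]? = cs[i + 1]?)

lemma pvFold_eq_segsFrom (cs : List Char) : ∀ (bs : List Nat) (start : Nat)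
    (acc : List (List Char)),
    (bs.foldl (fun (p : List (List Char) × Nat) b =>
      (p.1 ++ [PySem.List.slice cs (some ((p.2 : Nat) : Int)) (some (((b : Nat) : Int) + 1))], b + 1))
      (acc, start)).1 ++
      [(bs.foldl (fun (p : List (List Char) × Nat) b =>
      (p.1 ++ [PySem.List.slice cs (some ((p.2 : Nat) : Int)) (some (((b : Nat) : Int) + 1))], b + 1))
      (acc, start)).2 |> cs.drop] = acc ++ pvSegsFrom cs bs start := by
  intro bs
  induction bs with
  | nil => intro start acc; simp [pvSegsFrom]
  | cons b bs ih =>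
    intro start acc
    simp only [List.foldl_cons, pvSegsFrom]
    rw [ih (b + 1) (acc ++ [PySem.List.slice cs (some (start : Int)) (some ((b : Int) + 1))])]
    have : PySem.List.slice cs (some (start : Int)) (some ((b : Int) + 1)) =
        (cs.drop start).take (b + 1 - start) := by
      rw [show ((b : Int) + 1) = (((b + 1 : Nat) : Int)) by push_cast; ring]
      exact PySem.List.slice_natCast cs start (b + 1)
    simp [this]

lemma pvBnd_cons (a b : Char) (t : List Char) :
    pvBnd (a :: b :: t) = (if a = b then [0] else []) ++ (pvBnd (b :: t)).map (· + 1) := by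
  unfold pvBnd
  have hr : List.range ((a :: b :: t).length - 1) =
      0 :: (List.range ((b :: t).length - 1)).map (· + 1) := by
    simp only [List.length_cons, Nat.add_sub_cancel]
    rw [List.range_succ_eq_map]
  rw [hr, List.filter_cons]
  have htail : List.filter (fun i => decide ((a :: b :: t)[i]? = (a :: b :: t)[i + 1]?))
      ((List.range ((b :: t).length - 1)).map (· + 1)) =
      (List.filter (fun i => decide ((b :: t)[i]? = (b :: t)[i + 1]?))
        (List.range ((b :: t).length - 1))).map (· + 1) := by
    rw [List.filter_map]
    congr 1
  rw [htail]
  by_cases hab : a = b <;> simp [hab]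

lemma pvSegsFrom_shift (a : Char) (t : List Char) : ∀ (bs : List Nat) (s : Nat),
    pvSegsFrom (a :: t) (bs.map (· + 1)) (s + 1) = pvSegsFrom t bs s := by
  intro bs
  induction bs with
  | nil => intro s; simp [pvSegsFrom]
  | cons b bs ih =>
    intro s
    simp only [List.map_cons, pvSegsFrom, List.drop_succ_cons]
    rw [ih (b + 1)]
    have harith : b + 1 + 1 - (s + 1) = b + 1 - s := by omega
    rw [harith]

lemma pvSegsFrom_shift_zero (a : Char) (t : List Char) (bs : List Nat) :
    pvSegsFrom (a :: t) (bs.map (· + 1)) 0 = pvConsHead [a] (pvSegsFrom t bs 0) := by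
  cases bs with
  | nil => simp [pvSegsFrom, pvConsHead]
  | cons b bs =>
    simp only [List.map_cons, pvSegsFrom]
    rw [pvSegsFrom_shift a t bs (b + 1)]
    simp [pvConsHead]

lemma segsFrom_eq_split (cs : List Char) (h : cs ≠ []) :
    pvSegsFrom cs (pvBnd cs) 0 = pvSplit cs := by
  match cs with
  | [c] =>
    have : pvBnd [c] = [] := by simp [pvBnd]
    simp [this, pvSegsFrom, pvSplit]
  | a :: b :: t =>
    rw [pvBnd_cons]
    by_cases hab : a = b
    · rw [if_pos hab]
      show pvSegsFrom (a :: b :: t) (0 :: (pvBnd (b :: t)).map (· + 1)) 0 = _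
      simp only [pvSegsFrom]
      rw [pvSegsFrom_shift a (b :: t) (pvBnd (b :: t)) 0]
      rw [segsFrom_eq_split (b :: t) (by simp)]
      rw [pvSplit_cons_eq a b t hab]
      simp
    · rw [if_neg hab, List.nil_append]
      rw [pvSegsFrom_shift_zero]
      rw [segsFrom_eq_split (b :: t) (by simp)]
      rw [pvSplit_cons_ne a b t hab]

-- B's segment list is pvSplit
lemma segsB_eq (cs : List Char) (h : cs ≠ []) : pvSegsB cs = pvSplit cs := by
  have hfold := pvFold_eq_segsFrom cs (pvBnd cs) 0 []
  simp only [List.nil_append] at hfold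
  have hsl : ∀ (k : Nat), PySem.List.slice cs (some ((k : Nat) : Int)) none = cs.drop k :=
    fun k => PySem.List.slice_from_natCast cs k
  show (if cs = [] then _ else _) = pvSplit cs
  rw [if_neg h]
  rw [show ((List.range (cs.length - 1)).filter (fun i => cs[i]? = cs[i + 1]?)) = pvBnd cs
    from rfl]
  rw [hsl, hfold]
  exact segsFrom_eq_split cs h

-- ===== VERDICT (by name: the statement is the Claim_ definition above) =====
theorem doubleCharDelimeter_spec : Claim_equal_doubleCharDelimeter := by
  intro word _ hpre
  unfold Spec_doubleCharDelimeter doubleCharDelimeter doubleCharDelimeter_alt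
  have hcs : word.toList ≠ [] := by
    intro h
    exact hpre (by cases word with | _ l => simpa using congrArg String.ofList h)
  rw [segsA_eq word.toList hcs, segsB_eq word.toList hcs]
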